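-- pv_equiv track=rewrite | github.com/secret-deus/dingbot | k8s-mcp/src/k8s_mcp/tools/k8s_cluster_summary.py | _generate_remediation_suggestions
-- ===== SOURCE A (Python) =====
-- from typing import Dict, List, Optional, Any, Union
--
-- def _generate_remediation_suggestions(anomalies: List[Dict[str, Any]]) -> Dict[str, List[str]]:
--     """生成修复建议"""
--     suggestions = {
--         "immediate_actions": [],
--         "preventive_measures": [],
--         "monitoring_improvements": []
--     }
--
--     for anomaly in anomalies[:5]:  # 前5个异常
--         reason = anomaly.get("reason", "")
--         if "ImagePullBackOff" in reason:
--             suggestions["immediate_actions"].append("检查镜像仓库连接和镜像标签")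
--         elif "CrashLoopBackOff" in reason:
--             suggestions["immediate_actions"].append("检查应用日志和配置")
--         elif "OutOfMemory" in reason:
--             suggestions["immediate_actions"].append("调整内存限制或优化应用内存使用")
--
--     return suggestions
-- ===== SOURCE B (Python) =====
-- _PATTERNS = [
--     ("ImagePullBackOff", "检查镜像仓库连接和镜像标签"),
--     ("CrashLoopBackOff", "检查应用日志和配置"),
--     ("OutOfMemory", "调整内存限制或优化应用内存使用"),
-- ]
--
--
-- def _generate_remediation_suggestions(anomalies):
--     """生成修复建议 (pattern-major: one filling pass per pattern over a slot array)"""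
--     reasons = [a.get("reason", "") for a in anomalies[:5]]
--     slots = [None] * len(reasons)
--     for pattern, msg in _PATTERNS:
--         for i, r in enumerate(reasons):
--             if slots[i] is None and pattern in r:
--                 slots[i] = msg
--     return {
--         "immediate_actions": [m for m in slots if m is not None],
--         "preventive_measures": [],
--         "monitoring_improvements": [],
--     }
-- ===== Notes on version B (the rewrite author's own statement) =====
-- stated objective: alternative
-- what changed: Inverts the traversal: instead of scanning each anomaly and walking an if/elif chain, B makes one pass per pattern over a per-anomaly slot array, filling each still-empty slot whose reason contains the pattern (earlier patterns win because later passes skip filled slots), then compacts the slots.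
import Mathlib
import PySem

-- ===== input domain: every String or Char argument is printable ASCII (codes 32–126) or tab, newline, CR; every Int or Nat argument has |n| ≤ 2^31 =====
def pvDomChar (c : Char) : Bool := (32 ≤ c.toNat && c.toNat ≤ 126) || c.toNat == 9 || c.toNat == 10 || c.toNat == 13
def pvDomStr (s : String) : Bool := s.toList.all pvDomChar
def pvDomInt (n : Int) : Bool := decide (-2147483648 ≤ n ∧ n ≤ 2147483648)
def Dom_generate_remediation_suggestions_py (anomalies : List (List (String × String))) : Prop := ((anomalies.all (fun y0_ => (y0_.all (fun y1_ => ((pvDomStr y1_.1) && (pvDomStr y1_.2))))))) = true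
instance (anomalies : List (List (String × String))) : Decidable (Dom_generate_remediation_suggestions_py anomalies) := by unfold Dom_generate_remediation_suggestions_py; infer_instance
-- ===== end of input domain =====

-- B inverts the traversal: one filling pass per pattern over a per-anomaly slot array (earlier patterns win via still-empty slots), then compacts; objective: alternative, same cost.


-- ===== PORT A =====
def generate_remediation_suggestions_py (anomalies : List (List (String × String))) : List (String × List String) :=
  let s0 : PySem.Dict String (List String) :=
    ((PySem.Dict.empty.insert "immediate_actions" []).insert "preventive_measures" []).insert "monitoring_improvements" []
  let final := (PySem.List.slice anomalies none (some 5)).foldl (fun s anomaly =>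
    let reason := (PySem.Dict.mk anomaly).getD "reason" ""
    if PySem.Str.isIn "ImagePullBackOff" reason then
      s.modify "immediate_actions" [] (fun l => l ++ ["检查镜像仓库连接和镜像标签"])
    else if PySem.Str.isIn "CrashLoopBackOff" reason then
      s.modify "immediate_actions" [] (fun l => l ++ ["检查应用日志和配置"])
    else if PySem.Str.isIn "OutOfMemory" reason then
      s.modify "immediate_actions" [] (fun l => l ++ ["调整内存限制或优化应用内存使用"])
    else s) s0
  final.items

-- ===== PORT B =====
def pvPatterns : List (String × String) :=
  [("ImagePullBackOff", "检查镜像仓库连接和镜像标签"),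
   ("CrashLoopBackOff", "检查应用日志和配置"),
   ("OutOfMemory", "调整内存限制或优化应用内存使用")]

def generate_remediation_suggestions_py_alt (anomalies : List (List (String × String))) : List (String × List String) :=
  let reasons := (PySem.List.slice anomalies none (some 5)).map (fun a => (PySem.Dict.mk a).getD "reason" "")
  let slots0 : List (Option String) := reasons.map (fun _ => none)
  let slots := pvPatterns.foldl (fun slots pm =>
    (slots.zip reasons).map (fun sr => if sr.1.isNone && PySem.Str.isIn pm.1 sr.2 then some pm.2 else sr.1)) slots0
  [("immediate_actions", slots.filterMap id), ("preventive_measures", []), ("monitoring_improvements", [])]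

-- ===== PRECONDITION & SPEC =====
def Spec_generate_remediation_suggestions_py (anomalies : List (List (String × String))) (out : List (String × List String)) : Prop := out = generate_remediation_suggestions_py_alt anomalies
instance (anomalies : List (List (String × String))) (out : List (String × List String)) : Decidable (Spec_generate_remediation_suggestions_py anomalies out) := by unfold Spec_generate_remediation_suggestions_py; infer_instance

-- ===== CLAIM (what is proved, stated in full; the proofs are below) =====
def Claim_equal_generate_remediation_suggestions_py : Prop := ∀ (anomalies : List (List (String × String))), Dom_generate_remediation_suggestions_py anomalies → Spec_generate_remediation_suggestions_py anomalies (generate_remediation_suggestions_py anomalies)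

-- ===== LEMMAS AND PROOFS =====

-- The per-anomaly message: first pattern of the table found in the reason.
def pvMsgOfReason (r : String) : Option String :=
  (pvPatterns.find? (fun pm => PySem.Str.isIn pm.1 r)).map (·.2)

def pvMsg (anomaly : List (String × String)) : Option String :=
  pvMsgOfReason ((PySem.Dict.mk anomaly).getD "reason" "")

-- The table lookup, written as the same if-chain A uses.
lemma pvMsg_eq (a : List (String × String)) :
    pvMsg a =
      (if PySem.Str.isIn "ImagePullBackOff" ((PySem.Dict.mk a).getD "reason" "") then some "检查镜像仓库连接和镜像标签"
       else if PySem.Str.isIn "CrashLoopBackOff" ((PySem.Dict.mk a).getD "reason" "") then some "检查应用日志和配置"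
       else if PySem.Str.isIn "OutOfMemory" ((PySem.Dict.mk a).getD "reason" "") then some "调整内存限制或优化应用内存使用"
       else none) := by
  simp only [pvMsg, pvMsgOfReason, pvPatterns, List.find?]
  by_cases h1 : PySem.Str.isIn "ImagePullBackOff" ((PySem.Dict.mk a).getD "reason" "") = true
  · simp only [h1, if_pos, Option.map_some]
  · simp only [Bool.not_eq_true] at h1
    simp only [h1, Bool.false_eq_true, if_false]
    by_cases h2 : PySem.Str.isIn "CrashLoopBackOff" ((PySem.Dict.mk a).getD "reason" "") = true
    · simp only [h2, if_pos, Option.map_some]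
    · simp only [Bool.not_eq_true] at h2
      simp only [h2, Bool.false_eq_true, if_false]
      by_cases h3 : PySem.Str.isIn "OutOfMemory" ((PySem.Dict.mk a).getD "reason" "") = true
      · simp only [h3, if_pos, Option.map_some]
      · simp only [Bool.not_eq_true] at h3
        simp only [h3, Bool.false_eq_true, if_false, Option.map_none]

-- A's loop step preserves the 3-key shape and appends exactly the first-matching message.
lemma pv_step (l : List (List (String × String))) (acc : List String) :
    (l.foldl (fun s anomaly =>
      let reason := (PySem.Dict.mk anomaly).getD "reason" ""
      if PySem.Str.isIn "ImagePullBackOff" reason then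
        s.modify "immediate_actions" [] (fun l => l ++ ["检查镜像仓库连接和镜像标签"])
      else if PySem.Str.isIn "CrashLoopBackOff" reason then
        s.modify "immediate_actions" [] (fun l => l ++ ["检查应用日志和配置"])
      else if PySem.Str.isIn "OutOfMemory" reason then
        s.modify "immediate_actions" [] (fun l => l ++ ["调整内存限制或优化应用内存使用"])
      else s)
      (PySem.Dict.mk [("immediate_actions", acc), ("preventive_measures", []), ("monitoring_improvements", [])])).items
    = [("immediate_actions", acc ++ l.filterMap pvMsg), ("preventive_measures", []), ("monitoring_improvements", [])] := by
  induction l generalizing acc with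
  | nil => simp
  | cons a rest ih =>
    simp only [List.foldl_cons]
    by_cases h1 : PySem.Str.isIn "ImagePullBackOff" ((PySem.Dict.mk a).getD "reason" "") = true
    · rw [show ((PySem.Dict.mk [("immediate_actions", acc), ("preventive_measures", ([] : List String)), ("monitoring_improvements", [])]).modify "immediate_actions" [] (fun l => l ++ ["检查镜像仓库连接和镜像标签"])) = PySem.Dict.mk [("immediate_actions", acc ++ ["检查镜像仓库连接和镜像标签"]), ("preventive_measures", []), ("monitoring_improvements", [])] from by
        simp [PySem.Dict.modify, PySem.Dict.getD, PySem.Dict.get?, PySem.Dict.contains, PySem.Dict.insert]] at *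
      simp only [h1, if_pos, ih]
      rw [List.filterMap_cons, pvMsg_eq]
      simp at h1
      simp [h1]
    · by_cases h2 : PySem.Str.isIn "CrashLoopBackOff" ((PySem.Dict.mk a).getD "reason" "") = true
      · rw [show ((PySem.Dict.mk [("immediate_actions", acc), ("preventive_measures", ([] : List String)), ("monitoring_improvements", [])]).modify "immediate_actions" [] (fun l => l ++ ["检查应用日志和配置"])) = PySem.Dict.mk [("immediate_actions", acc ++ ["检查应用日志和配置"]), ("preventive_measures", []), ("monitoring_improvements", [])] from by
          simp [PySem.Dict.modify, PySem.Dict.getD, PySem.Dict.get?, PySem.Dict.contains, PySem.Dict.insert]] at *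
        simp only [h1, h2, if_neg, if_pos, Bool.not_eq_true, ih]
        rw [List.filterMap_cons, pvMsg_eq]
        simp at h1 h2
        simp [h1, h2]
      · by_cases h3 : PySem.Str.isIn "OutOfMemory" ((PySem.Dict.mk a).getD "reason" "") = true
        · rw [show ((PySem.Dict.mk [("immediate_actions", acc), ("preventive_measures", ([] : List String)), ("monitoring_improvements", [])]).modify "immediate_actions" [] (fun l => l ++ ["调整内存限制或优化应用内存使用"])) = PySem.Dict.mk [("immediate_actions", acc ++ ["调整内存限制或优化应用内存使用"]), ("preventive_measures", []), ("monitoring_improvements", [])] from by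
            simp [PySem.Dict.modify, PySem.Dict.getD, PySem.Dict.get?, PySem.Dict.contains, PySem.Dict.insert]] at *
          simp only [h1, h2, h3, if_neg, if_pos, Bool.not_eq_true, ih]
          rw [List.filterMap_cons, pvMsg_eq]
          simp at h1 h2 h3
          simp [h1, h2, h3]
        · simp only [h1, h2, h3, if_neg, Bool.not_eq_true, ih]
          rw [List.filterMap_cons, pvMsg_eq]
          simp at h1 h2 h3
          simp [h1, h2, h3]

-- B's pattern-major fold acts pointwise on each reason's slot.
lemma pv_zip_map_self {α β : Type} (l : List α) (g : α → β) :
    (l.map g).zip l = l.map (fun r => (g r, r)) := by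
  induction l with
  | nil => rfl
  | cons r rs ih => simp [ih]

lemma pv_fold_map (ps : List (String × String)) (reasons : List String) (g : String → Option String) :
    ps.foldl (fun slots pm =>
      ((slots.zip reasons).map (fun sr => if sr.1.isNone && PySem.Str.isIn pm.1 sr.2 then some pm.2 else sr.1)))
      (reasons.map g)
    = reasons.map (fun r => ps.foldl (fun s pm => if s.isNone && PySem.Str.isIn pm.1 r then some pm.2 else s) (g r)) := by
  induction ps generalizing g with
  | nil => simp
  | cons pm rest ih =>
    simp only [List.foldl_cons]
    rw [pv_zip_map_self, List.map_map]
    exact ih (fun r => if (g r).isNone && PySem.Str.isIn pm.1 r then some pm.2 else g r)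

-- once a slot is filled it is never overwritten
lemma pv_fold_some (ps : List (String × String)) (r m : String) :
    ps.foldl (fun s pm => if s.isNone && PySem.Str.isIn pm.1 r then some pm.2 else s) (some m) = some m := by
  induction ps with
  | nil => rfl
  | cons pm rest ih => simpa using ih

-- the per-reason slot fold computes the first matching pattern's message
lemma pv_fold_find (ps : List (String × String)) (r : String) :
    ps.foldl (fun s pm => if s.isNone && PySem.Str.isIn pm.1 r then some pm.2 else s) none
    = (ps.find? (fun pm => PySem.Str.isIn pm.1 r)).map (·.2) := by
  induction ps with
  | nil => rfl
  | cons pm rest ih =>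
    simp only [List.foldl_cons, Option.isNone_none, Bool.true_and]
    rw [List.find?_cons]
    by_cases h : PySem.Str.isIn pm.1 r = true
    · rw [h, if_pos rfl, pv_fold_some]; rfl
    · simp only [Bool.not_eq_true] at h
      rw [h]; simpa using ih

-- ===== VERDICT (by name: the statement is the Claim_ definition above) =====
theorem generate_remediation_suggestions_py_spec : Claim_equal_generate_remediation_suggestions_py := by
  intro anomalies _
  unfold Spec_generate_remediation_suggestions_py generate_remediation_suggestions_py generate_remediation_suggestions_py_alt
  have h0 : (((PySem.Dict.empty.insert "immediate_actions" []).insert "preventive_measures" []).insert "monitoring_improvements" [] : PySem.Dict String (List String))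
      = PySem.Dict.mk [("immediate_actions", []), ("preventive_measures", []), ("monitoring_improvements", [])] := by decide
  simp only [h0, pv_step, List.nil_append, pv_fold_map, pv_fold_find, List.filterMap_map]
  simp [pvMsg, pvMsgOfReason, Function.comp]
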